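-- pv_equiv track=rewrite | github.com/kschust/GermanHospitalABSA | functions/ate_absa_pipeline.py | merge_tokens_and_map_indices
-- ===== SOURCE A (Python) =====
-- def merge_tokens_and_map_indices(tokens):
--     """
--     Merges wordpiece tokens and maps which original token indices belong to each word.
--
--     Returns:
--         words: List of merged words
--         index_map: List of lists, each sublist contains indices of original tokens that formed one word
--     """
--     words = []
--     index_map = []
--     current_word = ""
--     current_indices = []
--
--     for i, token in enumerate(tokens):
--         if token.startswith("##"):
--             current_word += token[2:]
--             current_indices.append(i)
--         else:
--             if current_word:
--                 words.append(current_word)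
--                 index_map.append(current_indices)
--             current_word = token
--             current_indices = [i]
--
--     if current_word:
--         words.append(current_word)
--         index_map.append(current_indices)
--
--     return words, index_map
-- ===== SOURCE B (Python) =====
-- def merge_tokens_and_map_indices(tokens):
--     """
--     Merges wordpiece tokens and maps which original token indices belong to each word.
--
--     Two-pointer span scan: each word is the contiguous run tokens[i:j] where j is the
--     next non-'##' token; runs whose merged text is empty are skipped (as A does).
--     """
--     words = []
--     index_map = []
--     n = len(tokens)
--     i = 0
--     while i < n:
--         j = i + 1
--         while j < n and tokens[j].startswith("##"):
--             j += 1
--         word = "".join(t[2:] if t.startswith("##") else t for t in tokens[i:j])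
--         if word:
--             words.append(word)
--             index_map.append(list(range(i, j)))
--         i = j
--     return words, index_map
-- ===== Notes on version B (the rewrite author's own statement) =====
-- stated objective: alternative
-- what changed: Replaces A's single fused loop carrying a pending word/indices accumulator by a two-pointer span scan: each word is the contiguous run tokens[i:j] up to the next non-'##' token, built by joining stripped pieces of the slice, with empty-text runs skipped.
import Mathlib
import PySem

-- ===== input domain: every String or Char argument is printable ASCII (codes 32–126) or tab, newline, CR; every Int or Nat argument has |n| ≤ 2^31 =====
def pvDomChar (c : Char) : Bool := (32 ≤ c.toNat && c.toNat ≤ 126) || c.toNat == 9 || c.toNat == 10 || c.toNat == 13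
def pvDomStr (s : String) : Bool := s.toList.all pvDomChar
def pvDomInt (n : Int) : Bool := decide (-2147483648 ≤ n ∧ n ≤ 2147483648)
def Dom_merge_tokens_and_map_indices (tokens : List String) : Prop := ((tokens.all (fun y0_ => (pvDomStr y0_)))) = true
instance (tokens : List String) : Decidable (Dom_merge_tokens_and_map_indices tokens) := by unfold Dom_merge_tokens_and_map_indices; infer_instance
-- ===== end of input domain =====

-- B replaces A's fused loop (pending word/indices accumulator) by a two-pointer span scan
-- over contiguous '##'-runs; alternative structure, same cost.

-- ===== PORT A =====
-- state = (words, index_map, current_word, current_indices); the word being built is a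
-- List Char (Python str concatenation cw += t[2:] is List Char append; t[2:] = drop 2,
-- exact: Python's nonnegative-start slice clamps exactly like drop).
def pvAGo : List String → Int → List String × List (List Int) × List Char × List Int →
    List String × List (List Int) × List Char × List Int
  | [], _, st => st
  | t :: rest, i, (ws, im, cw, ci) =>
    if PySem.Str.startswith t "##" then
      pvAGo rest (i + 1) (ws, im, cw ++ t.toList.drop 2, ci ++ [i])
    else if cw ≠ [] then
      pvAGo rest (i + 1) (ws ++ [String.ofList cw], im ++ [ci], t.toList, [i])
    else
      pvAGo rest (i + 1) (ws, im, t.toList, [i])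

def merge_tokens_and_map_indices (tokens : List String) : List String × List (List Int) :=
  match pvAGo tokens 0 ([], [], [], []) with
  | (ws, im, cw, ci) => if cw ≠ [] then (ws ++ [String.ofList cw], im ++ [ci]) else (ws, im)

-- ===== PORT B =====
-- t[2:] if t.startswith("##") else t
def pvPiece (t : String) : List Char :=
  if PySem.Str.startswith t "##" then t.toList.drop 2 else t.toList

def pvBGo : List String → Int → List String × List (List Int)
  | [], _ => ([], [])
  | t :: rest, i =>
    -- inner while: extend j over the run of '##' tokens
    let hh := rest.takeWhile (fun s => PySem.Str.startswith s "##")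
    let rest' := rest.dropWhile (fun s => PySem.Str.startswith s "##")
    let j : Int := i + 1 + hh.length
    -- word = "".join(t[2:] if t.startswith("##") else t for t in tokens[i:j])
    let word := (t :: hh).flatMap pvPiece
    let p := pvBGo rest' j
    if word ≠ [] then (String.ofList word :: p.1, PySem.List.pyRange i j 1 :: p.2) else p
  termination_by ts => ts.length
  decreasing_by
    exact Nat.lt_succ_of_le (List.length_dropWhile_le _ _)

def merge_tokens_and_map_indices_alt (tokens : List String) : List String × List (List Int) :=
  pvBGo tokens 0

-- ===== PRECONDITION & SPEC =====
def Spec_merge_tokens_and_map_indices (tokens : List String) (out : List String × List (List Int)) : Prop := out = merge_tokens_and_map_indices_alt tokens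
instance (tokens : List String) (out : List String × List (List Int)) : Decidable (Spec_merge_tokens_and_map_indices tokens out) := by unfold Spec_merge_tokens_and_map_indices; infer_instance

-- ===== CLAIM (what is proved, stated in full; the proofs are below) =====
def Claim_equal_merge_tokens_and_map_indices : Prop := ∀ (tokens : List String), Dom_merge_tokens_and_map_indices tokens → Spec_merge_tokens_and_map_indices tokens (merge_tokens_and_map_indices tokens)

-- ===== LEMMAS AND PROOFS =====

-- A's loop followed by the final flush, as one function of the full state.
def pvARun (ts : List String) (i : Int)
    (st : List String × List (List Int) × List Char × List Int) : List String × List (List Int) :=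
  match pvAGo ts i st with
  | (ws, im, cw, ci) => if cw ≠ [] then (ws ++ [String.ofList cw], im ++ [ci]) else (ws, im)

theorem pvARun_nil (i : Int) (ws : List String) (im : List (List Int)) (cw : List Char) (ci : List Int) :
    pvARun [] i (ws, im, cw, ci) = if cw ≠ [] then (ws ++ [String.ofList cw], im ++ [ci]) else (ws, im) := rfl

theorem pvARun_cons (t : String) (rest : List String) (i : Int) (ws : List String)
    (im : List (List Int)) (cw : List Char) (ci : List Int) :
    pvARun (t :: rest) i (ws, im, cw, ci) =
      if PySem.Str.startswith t "##" then
        pvARun rest (i + 1) (ws, im, cw ++ t.toList.drop 2, ci ++ [i])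
      else if cw ≠ [] then
        pvARun rest (i + 1) (ws ++ [String.ofList cw], im ++ [ci], t.toList, [i])
      else
        pvARun rest (i + 1) (ws, im, t.toList, [i]) := by
  simp only [pvARun, pvAGo]
  split_ifs <;> rfl

-- L1: the finished words/index_map accumulators are a pure prefix of the result.
theorem pvARun_prefix (ts : List String) : ∀ (i : Int) (ws : List String) (im : List (List Int))
    (cw : List Char) (ci : List Int),
    pvARun ts i (ws, im, cw, ci) =
      (ws ++ (pvARun ts i ([], [], cw, ci)).1, im ++ (pvARun ts i ([], [], cw, ci)).2) := by
  induction ts with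
  | nil =>
    intro i ws im cw ci
    simp only [pvARun_nil]
    split_ifs <;> simp
  | cons t rest ih =>
    intro i ws im cw ci
    rw [pvARun_cons, pvARun_cons]
    simp only [List.nil_append]
    split_ifs with h1 h2
    · exact ih (i + 1) ws im (cw ++ t.toList.drop 2) (ci ++ [i])
    · rw [ih (i + 1) (ws ++ [String.ofList cw]) (im ++ [ci]) t.toList [i],
          ih (i + 1) [String.ofList cw] [ci] t.toList [i]]
      simp
    · exact ih (i + 1) ws im t.toList [i]

theorem pv_range_map_shift (i : Int) (n : Nat) :
    (List.range (n + 1)).map (fun k : Nat => i + (k : Int)) =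
      i :: (List.range n).map (fun k : Nat => (i + 1) + (k : Int)) := by
  rw [List.range_succ_eq_map, List.map_cons, List.map_map]
  congr 1
  · simp
  · apply List.map_congr_left
    intro k _
    simp only [Function.comp_apply]
    push_cast
    ring

theorem pv_pyRange_shift (n : Nat) : ∀ (i : Int),
    PySem.List.pyRange i (i + (n : Int)) 1 = (List.range n).map (fun k : Nat => i + (k : Int)) := by
  induction n with
  | zero =>
    intro i
    simp
  | succ n ih =>
    intro i
    rw [PySem.List.pyRange_one_cons (by push_cast; omega), pv_range_map_shift]
    have e : i + ((n + 1 : Nat) : Int) = (i + 1) + (n : Int) := by push_cast; ring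
    rw [e, ih (i + 1)]

-- L2: running A over a run of '##' tokens just extends the pending word and indices.
theorem pvARun_run (hh : List String) : ∀ (rest : List String) (i : Int) (cw : List Char) (ci : List Int),
    (∀ s ∈ hh, PySem.Str.startswith s "##" = true) →
    pvARun (hh ++ rest) i ([], [], cw, ci) =
      pvARun rest (i + hh.length) ([], [],
        cw ++ hh.flatMap (fun s => s.toList.drop 2),
        ci ++ (List.range hh.length).map (fun k : Nat => i + (k : Int))) := by
  induction hh with
  | nil => intro rest i cw ci _; simp
  | cons h hh' ih =>
    intro rest i cw ci hall
    have hh1 : PySem.Str.startswith h "##" = true := hall h (by simp)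
    rw [List.cons_append, pvARun_cons, if_pos hh1,
        ih rest (i + 1) (cw ++ h.toList.drop 2) (ci ++ [i]) (fun s hs => hall s (by simp [hs]))]
    simp only [List.length_cons, List.flatMap_cons]
    push_cast
    rw [show i + ((hh'.length : Int) + 1) = (i + 1) + hh'.length from by ring,
        pv_range_map_shift]
    simp [List.append_assoc]

-- L3: at a run boundary (end of input or a non-'##' token) the pending word flushes
-- (if nonempty) in front of the rest of the computation, which restarts empty.
theorem pvARun_boundary (rest : List String) (j : Int) (cw : List Char) (ci : List Int)
    (hb : rest = [] ∨ ∃ t r, rest = t :: r ∧ PySem.Str.startswith t "##" = false) :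
    pvARun rest j ([], [], cw, ci) =
      ((if cw ≠ [] then [String.ofList cw] else []) ++ (pvARun rest j ([], [], [], [])).1,
       (if cw ≠ [] then [ci] else []) ++ (pvARun rest j ([], [], [], [])).2) := by
  rcases hb with rfl | ⟨t, r, rfl, ht⟩
  · simp only [pvARun_nil]
    by_cases h : cw = [] <;> simp [h]
  · have hne : ¬ (PySem.Str.startswith t "##" = true) := by rw [ht]; simp
    rw [pvARun_cons, pvARun_cons, if_neg hne, if_neg hne,
        if_neg (show ¬ (([] : List Char) ≠ []) by simp)]
    simp only [List.nil_append]
    split_ifs with h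
    · exact pvARun_prefix r (j + 1) [String.ofList cw] [ci] t.toList [j]
    · simp

theorem pvBGo_cons (t : String) (rest : List String) (i : Int) :
    pvBGo (t :: rest) i =
      (let hh := rest.takeWhile (fun s => PySem.Str.startswith s "##")
       let rest' := rest.dropWhile (fun s => PySem.Str.startswith s "##")
       let j : Int := i + 1 + hh.length
       let word := (t :: hh).flatMap pvPiece
       let p := pvBGo rest' j
       if word ≠ [] then (String.ofList word :: p.1, PySem.List.pyRange i j 1 :: p.2) else p) := by
  rw [pvBGo]

-- Main: A (from an empty state) computes B's span scan, at every start index.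
theorem pvARun_eq_pvBGo : ∀ (n : Nat) (ts : List String), ts.length ≤ n → ∀ (i : Int),
    pvARun ts i ([], [], [], []) = pvBGo ts i := by
  intro n
  induction n with
  | zero =>
    intro ts hts i
    have : ts = [] := List.length_eq_zero_iff.mp (Nat.le_zero.mp hts)
    subst this
    simp [pvARun_nil, pvBGo]
  | succ n ih =>
    intro ts hts i
    match ts with
    | [] => simp [pvARun_nil, pvBGo]
    | t :: rest =>
      set P : String → Bool := fun s => PySem.Str.startswith s "##" with hP
      set hh := rest.takeWhile P with hhh
      set rest' := rest.dropWhile P with hrest'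
      have hsplit : rest = hh ++ rest' := (List.takeWhile_append_dropWhile).symm
      have hall : ∀ s ∈ hh, P s = true := by
        rw [hhh]
        exact fun s hs => List.all_eq_true.mp List.all_takeWhile s hs
      have hallS : ∀ s ∈ hh, PySem.Str.startswith s "##" = true := by
        intro s hs
        have := hall s hs
        simpa [hP] using this
      -- step 1: the first token becomes the pending piece, in both of A's branches
      have step1 : pvARun (t :: rest) i ([], [], [], []) =
          pvARun rest (i + 1) ([], [], pvPiece t, [i]) := by
        rw [pvARun_cons]
        by_cases h : PySem.Str.startswith t "##"
        · have hp : pvPiece t = t.toList.drop 2 := by unfold pvPiece; rw [if_pos h]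
          rw [if_pos h, hp]
          simp
        · have hp : pvPiece t = t.toList := by unfold pvPiece; rw [if_neg h]
          rw [if_neg h, if_neg (by simp), hp]
      -- step 2: the '##' run extends the pending word and indices
      have hrun : pvARun rest (i + 1) ([], [], pvPiece t, [i]) =
          pvARun rest' (i + 1 + hh.length) ([], [],
            pvPiece t ++ hh.flatMap (fun s => s.toList.drop 2),
            [i] ++ (List.range hh.length).map (fun k : Nat => (i + 1) + (k : Int))) := by
        conv_lhs => rw [hsplit]
        exact pvARun_run hh rest' (i + 1) (pvPiece t) [i] hallS
      -- the pending word after the run is B's merged word for the span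
      have hword : pvPiece t ++ hh.flatMap (fun s => s.toList.drop 2) =
          (t :: hh).flatMap pvPiece := by
        simp only [List.flatMap_cons]
        congr 1
        apply List.flatMap_congr
        intro s hs
        unfold pvPiece
        rw [if_pos (hallS s hs)]
      -- the pending indices after the run are B's range for the span
      have hidx : [i] ++ (List.range hh.length).map (fun k : Nat => (i + 1) + (k : Int)) =
          PySem.List.pyRange i (i + 1 + hh.length) 1 := by
        have e : i + 1 + (hh.length : Int) = i + ((hh.length + 1 : Nat) : Int) := by
          push_cast; ring
        rw [e, pv_pyRange_shift (hh.length + 1) i, pv_range_map_shift]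
        rfl
      -- boundary: the head of rest' (if any) is not a '##' token
      have hb : rest' = [] ∨ ∃ u r, rest' = u :: r ∧ PySem.Str.startswith u "##" = false := by
        cases hrr : rest' with
        | nil => exact Or.inl rfl
        | cons u r =>
          refine Or.inr ⟨u, r, rfl, ?_⟩
          have hdw : List.dropWhile P rest = u :: r := by rw [← hrest']; exact hrr
          have h0 := List.head?_dropWhile_not P rest
          rw [hdw] at h0
          simpa [hP] using h0
      have hlen : rest'.length ≤ n := by
        have h1 : rest'.length ≤ rest.length := by rw [hrest']; exact List.length_dropWhile_le _ _
        simp at hts; omega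
      rw [step1, hrun, hword, hidx,
          pvARun_boundary rest' (i + 1 + hh.length) _ _ hb, ih rest' hlen, pvBGo_cons]
      simp only [← hP, ← hhh, ← hrest']
      split_ifs with h
      · simp
      · simp

-- ===== VERDICT (by name: the statement is the Claim_ definition above) =====
theorem merge_tokens_and_map_indices_spec : Claim_equal_merge_tokens_and_map_indices := by
  intro tokens _
  show merge_tokens_and_map_indices tokens = merge_tokens_and_map_indices_alt tokens
  have h : merge_tokens_and_map_indices tokens = pvARun tokens 0 ([], [], [], []) := rfl
  rw [h, pvARun_eq_pvBGo tokens.length tokens le_rfl 0]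
  rfl
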